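-- pv_equiv track=rewrite | github.com/ouiex/mocra | python_mocra/utils/string_case.py | to_dot_case
-- ===== SOURCE A (Python) =====
-- def to_dot_case(value: str) -> str:
--     result = []
--     for i, ch in enumerate(value):
--         if ch.isupper():
--             if i != 0:
--                 result.append(".")
--             result.append(ch.lower())
--         else:
--             result.append(ch)
--     return "".join(result)
-- ===== SOURCE B (Python) =====
-- def _segments(s):
--     # split s into maximal segments, each starting at index 0 or at an uppercase char
--     if not s:
--         return []
--     k = 1
--     while k < len(s) and not s[k].isupper():
--         k += 1
--     return [s[:k]] + _segments(s[k:])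
--
--
-- def to_dot_case(value: str) -> str:
--     segs = _segments(value)
--     return ".".join(seg[0].lower() + seg[1:] for seg in segs)
-- ===== Notes on version B (the rewrite author's own statement) =====
-- stated objective: alternative
-- what changed: B slices the string into maximal segments at uppercase boundaries and joins the segments (first char lowercased) with a dot separator, instead of A's char-by-char indexed loop appending pieces to an accumulator.
import Mathlib
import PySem

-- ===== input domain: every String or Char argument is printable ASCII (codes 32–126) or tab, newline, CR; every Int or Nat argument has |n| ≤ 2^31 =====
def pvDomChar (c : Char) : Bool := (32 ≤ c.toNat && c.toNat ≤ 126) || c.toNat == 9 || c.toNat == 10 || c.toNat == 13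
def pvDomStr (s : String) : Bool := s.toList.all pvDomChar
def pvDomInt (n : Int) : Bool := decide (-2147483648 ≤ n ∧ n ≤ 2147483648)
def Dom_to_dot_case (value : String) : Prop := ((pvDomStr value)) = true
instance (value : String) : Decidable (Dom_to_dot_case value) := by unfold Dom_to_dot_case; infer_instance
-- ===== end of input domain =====

-- B re-implements to_dot_case by slicing the string into maximal segments at uppercase
-- boundaries and joining them with a dot separator, instead of A's char-by-char accumulator loop
-- (alternative decomposition, same O(n) cost).

-- ===== PORT A =====
-- literal transliteration: for i, ch in enumerate(value): … result.append(…); "".join(result)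
-- (Python strings are represented as List Char; result : List (List Char), joined with sep [])
def to_dot_case (value : String) : String :=
  let result : List (List Char) :=
    (PySem.List.enumerate value.toList).foldl
      (fun r p =>
        if PySem.Chars.isupper p.2 then
          (if p.1 ≠ 0 then r ++ [['.']] else r) ++ [[PySem.Chars.lowerChar p.2]]
        else r ++ [[p.2]]) []
  String.ofList (PySem.Chars.join [] result)

-- ===== PORT B =====
-- seg[0].lower() + seg[1:]  (segments are nonempty by construction)
def pvTr : List Char → List Char
  | [] => []
  | c :: cs => PySem.Chars.lowerChar c :: cs

-- _segments: the inner while-loop scans for the first uppercase char at index ≥ 1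
-- (= takeWhile on the tail), then slices s[:k] / s[k:] and recurses.
def pvSegs : List Char → List (List Char)
  | [] => []
  | c :: cs =>
    (c :: cs.takeWhile (fun x => !PySem.Chars.isupper x)) ::
      pvSegs (cs.dropWhile (fun x => !PySem.Chars.isupper x))
termination_by l => l.length
decreasing_by
  simp only [List.length_cons]
  exact Nat.lt_succ_of_le (List.length_dropWhile_le _ _)

def to_dot_case_alt (value : String) : String :=
  String.ofList (PySem.Chars.join ['.'] ((pvSegs value.toList).map pvTr))

-- ===== PRECONDITION & SPEC =====
def Spec_to_dot_case (value : String) (out : String) : Prop := out = to_dot_case_alt value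
instance (value : String) (out : String) : Decidable (Spec_to_dot_case value out) := by unfold Spec_to_dot_case; infer_instance

-- ===== CLAIM (what is proved, stated in full; the proofs are below) =====
def Claim_equal_to_dot_case : Prop := ∀ (value : String), Dom_to_dot_case value → Spec_to_dot_case value (to_dot_case value)

-- ===== LEMMAS AND PROOFS =====

-- common characterisation: contribution of the chars after the first one (index ≥ 1)
def pvRec : List Char → List Char
  | [] => []
  | c :: cs =>
    (if PySem.Chars.isupper c then ['.', PySem.Chars.lowerChar c] else [c]) ++ pvRec cs

-- common characterisation of both outputs (as a char list)
def pvSpec : List Char → List Char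
  | [] => []
  | c :: cs =>
    (if PySem.Chars.isupper c then [PySem.Chars.lowerChar c] else [c]) ++ pvRec cs

theorem pvLowerChar_of_not_upper (c : Char) (h : PySem.Chars.isupper c = false) :
    PySem.Chars.lowerChar c = c := by
  simp [PySem.Chars.lowerChar, h]

theorem pvJoinNil_cons (p : List Char) (xs : List (List Char)) :
    PySem.Chars.join [] (p :: xs) = p ++ PySem.Chars.join [] xs := by
  cases xs <;> simp [PySem.Chars.join_nil, PySem.Chars.join_singleton, PySem.Chars.join_cons_cons]

theorem pvJoinNil_append (xs ys : List (List Char)) :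
    PySem.Chars.join [] (xs ++ ys) = PySem.Chars.join [] xs ++ PySem.Chars.join [] ys := by
  induction xs with
  | nil => simp
  | cons p ps ih => simp [pvJoinNil_cons, ih]

theorem pvA_loop (cs : List Char) (s : Int) (hs : 1 ≤ s) (r : List (List Char)) :
    PySem.Chars.join []
      ((PySem.List.enumerate cs s).foldl
        (fun r p =>
          if PySem.Chars.isupper p.2 then
            (if p.1 ≠ 0 then r ++ [['.']] else r) ++ [[PySem.Chars.lowerChar p.2]]
          else r ++ [[p.2]]) r)
    = PySem.Chars.join [] r ++ pvRec cs := by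
  induction cs generalizing s r with
  | nil => simp [PySem.List.enumerate_nil, pvRec]
  | cons c cs ih =>
    rw [PySem.List.enumerate_cons, List.foldl_cons]
    rw [ih (s + 1) (by omega)]
    have hs0 : s ≠ 0 := by omega
    by_cases h : PySem.Chars.isupper c
    · simp [h, hs0, pvRec, pvJoinNil_append, pvJoinNil_cons]
    · simp [h, pvRec, pvJoinNil_append]

theorem pvA_chars (l : List Char) :
    PySem.Chars.join []
      ((PySem.List.enumerate l).foldl
        (fun r p =>
          if PySem.Chars.isupper p.2 then
            (if p.1 ≠ 0 then r ++ [['.']] else r) ++ [[PySem.Chars.lowerChar p.2]]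
          else r ++ [[p.2]]) [])
    = pvSpec l := by
  cases l with
  | nil => simp [PySem.List.enumerate, PySem.Chars.join_nil, pvSpec]
  | cons c cs =>
    rw [show PySem.List.enumerate (c :: cs) = PySem.List.enumerate (c :: cs) 0 from rfl,
        PySem.List.enumerate_cons, List.foldl_cons]
    rw [pvA_loop cs (0 + 1) (by omega)]
    by_cases h : PySem.Chars.isupper c
    · simp [h, pvSpec]
    · simp [h, pvSpec]

theorem pvRec_nonupper (t : List Char) (h : ∀ x ∈ t, PySem.Chars.isupper x = false) :
    pvRec t = t := by
  induction t with
  | nil => rfl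
  | cons x xs ih =>
    have hx := h x (by simp)
    simp [pvRec, hx, ih (fun y hy => h y (by simp [hy]))]

theorem pvRec_append_nonupper (t d : List Char)
    (h : ∀ x ∈ t, PySem.Chars.isupper x = false) :
    pvRec (t ++ d) = t ++ pvRec d := by
  induction t with
  | nil => rfl
  | cons x xs ih =>
    have hx := h x (by simp)
    simp [pvRec, hx, ih (fun y hy => h y (by simp [hy]))]

theorem pvB_segs : ∀ (n : Nat) (l : List Char), l.length ≤ n → l ≠ [] →
    PySem.Chars.join ['.'] ((pvSegs l).map pvTr) = pvSpec l := by
  intro n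
  induction n with
  | zero => intro l hl hne; cases l with
    | nil => exact absurd rfl hne
    | cons c cs => simp at hl
  | succ n ih =>
    intro l hl hne
    cases l with
    | nil => exact absurd rfl hne
    | cons c cs =>
      set t := cs.takeWhile (fun x => !PySem.Chars.isupper x) with ht
      set d := cs.dropWhile (fun x => !PySem.Chars.isupper x) with hd
      have htND : ∀ x ∈ t, PySem.Chars.isupper x = false := by
        intro x hx
        have := List.mem_takeWhile_imp hx
        simpa using this
      have hcs : cs = t ++ d := (List.takeWhile_append_dropWhile).symm
      rw [show pvSegs (c :: cs) = (c :: t) :: pvSegs d from by rw [pvSegs]]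
      cases hdc : d with
      | nil =>
        rw [hdc] at hcs
        simp only [pvSegs, List.map_cons, List.map_nil,
          PySem.Chars.join_singleton]
        simp only [pvSpec, hcs, List.append_nil]
        rw [pvRec_nonupper t htND]
        by_cases h : PySem.Chars.isupper c
        · simp [pvTr, h]
        · simp [pvTr, h, pvLowerChar_of_not_upper c (by simpa using h)]
      | cons d0 d1 =>
        have hd0 : PySem.Chars.isupper d0 = true := by
          have h2 := List.head?_dropWhile_not
            (fun x => !PySem.Chars.isupper x) cs
          rw [← hd, hdc] at h2
          simpa using h2
        have hdlen : d.length ≤ n := by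
          have h1 : d.length ≤ cs.length := hd ▸ List.length_dropWhile_le _ _
          have h2 : cs.length + 1 ≤ n + 1 := by simpa using hl
          omega
        have hIH := ih d (by rw [hdc] at hdlen ⊢; exact hdlen) (by simp [hdc])
        rw [hdc] at hIH
        rw [show pvSegs (d0 :: d1) =
            (d0 :: d1.takeWhile (fun x => !PySem.Chars.isupper x)) ::
              pvSegs (d1.dropWhile (fun x => !PySem.Chars.isupper x)) from by rw [pvSegs]] at hIH ⊢
        rw [List.map_cons] at hIH
        rw [List.map_cons, List.map_cons, PySem.Chars.join_cons_cons, hIH]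
        simp only [pvSpec, hcs, hdc]
        rw [pvRec_append_nonupper t _ htND]
        simp only [pvRec, hd0, if_pos]
        by_cases h : PySem.Chars.isupper c
        · simp [pvTr, h]
        · simp [pvTr, h, pvLowerChar_of_not_upper c (by simpa using h)]

-- ===== VERDICT (by name: the statement is the Claim_ definition above) =====
theorem to_dot_case_spec : Claim_equal_to_dot_case := by
  intro value _
  unfold Spec_to_dot_case to_dot_case to_dot_case_alt
  dsimp only
  cases hl : value.toList with
  | nil => simp [PySem.List.enumerate, pvSegs, PySem.Chars.join_nil]
  | cons c cs =>
    rw [pvA_chars]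
    rw [pvB_segs (c :: cs).length (c :: cs) le_rfl (by simp)]
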